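-- pv_equiv track=rewrite | github.com/rahul2983/agentic-rag-drive-monitor | main-simple.py | determine_event_duration
-- ===== SOURCE A (Python) =====
-- def determine_event_duration(description: str, priority: str) -> int:
--     """Determine event duration based on action type and priority"""
--
--     # Keywords that suggest longer meetings
--     long_meeting_keywords = [
--         'meeting', 'presentation', 'review', 'discussion', 'training',
--         'session', 'workshop', 'interview', 'negotiation'
--     ]
--
--     # Keywords that suggest shorter tasks
--     short_task_keywords = [
--         'submit', 'send', 'call', 'email', 'update', 'change',
--         'check', 'verify', 'approve', 'sign'
--     ]
--
--     description_lower = description.lower()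
--
--     # Check for meeting-type activities
--     if any(keyword in description_lower for keyword in long_meeting_keywords):
--         return 2 if priority == "high" else 1  # 2 hours for high priority meetings, 1 for others
--
--     # Check for quick tasks
--     elif any(keyword in description_lower for keyword in short_task_keywords):
--         return 1  # 30 minutes for quick tasks
--
--     # Default duration based on priority
--     elif priority == "high":
--         return 1  # 1 hour for high priority items
--     else:
--         return 1  # 30 minutes for medium/low priority
-- ===== SOURCE B (Python) =====
-- def determine_event_duration(description: str, priority: str) -> int:
--     """Determine event duration based on action type and priority"""
--     # Position-based scan: walk the lowered description once and test, at each
--     # position, whether a long-meeting keyword starts there.  Only a high-priority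
--     # long-meeting description gets 2 hours; everything else gets 1.
--     long_meeting_keywords = [
--         'meeting', 'presentation', 'review', 'discussion', 'training',
--         'session', 'workshop', 'interview', 'negotiation'
--     ]
--     if priority != "high":
--         return 1
--     d = description.lower()
--     for i in range(len(d)):
--         for k in long_meeting_keywords:
--             if d.startswith(k, i):
--                 return 2
--     return 1
-- ===== Notes on version B (the rewrite author's own statement) =====
-- stated objective: alternative
-- what changed: B inverts the control flow: it returns 1 immediately for non-high priority (A's short-task scan and default branches all yield 1), and detects a long-meeting keyword by a single position-based scan over the lowered description testing startswith at each index with an early return, instead of A's per-keyword substring ('in') tests followed by a four-branch if/elif chain.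
import Mathlib
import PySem

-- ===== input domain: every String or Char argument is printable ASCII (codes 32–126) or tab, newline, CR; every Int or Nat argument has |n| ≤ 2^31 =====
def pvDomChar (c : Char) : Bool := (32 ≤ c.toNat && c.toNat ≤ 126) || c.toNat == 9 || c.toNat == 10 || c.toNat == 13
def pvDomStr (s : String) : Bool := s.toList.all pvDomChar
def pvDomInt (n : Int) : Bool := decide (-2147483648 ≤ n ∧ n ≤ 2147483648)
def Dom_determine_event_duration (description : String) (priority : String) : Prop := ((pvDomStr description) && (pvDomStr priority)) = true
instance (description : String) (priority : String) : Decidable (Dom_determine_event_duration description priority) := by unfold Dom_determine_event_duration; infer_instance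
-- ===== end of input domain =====

-- B returns 1 at once for non-high priority and finds a long-meeting keyword by a
-- position-based startswith scan instead of A's per-keyword 'in' tests plus if/elif chain
-- (objective: alternative; same return value).

-- ===== PORT A =====
def longMeetingKeywords : List String :=
  ["meeting", "presentation", "review", "discussion", "training",
   "session", "workshop", "interview", "negotiation"]

def shortTaskKeywords : List String :=
  ["submit", "send", "call", "email", "update", "change",
   "check", "verify", "approve", "sign"]

def determine_event_duration (description : String) (priority : String) : Int :=
  let description_lower := PySem.Str.lower description
  if longMeetingKeywords.any (fun keyword => PySem.Str.isIn keyword description_lower) then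
    if priority == "high" then 2 else 1
  else if shortTaskKeywords.any (fun keyword => PySem.Str.isIn keyword description_lower) then
    1
  else if priority == "high" then
    1
  else
    1

-- ===== PORT B =====
def altLongMeetingKeywords : List String :=
  ["meeting", "presentation", "review", "discussion", "training",
   "session", "workshop", "interview", "negotiation"]

-- the position loop 'for i in range(len(d)): for k in …: if d.startswith(k, i): return 2'
-- as structural recursion over the suffixes of d (d.startswith(k, i) is exactly
-- k.toList.isPrefixOf (d.drop i))
def pvScan (kws : List String) : List Char → Bool
  | [] => false
  | c :: rest =>
    if kws.any (fun k => k.toList.isPrefixOf (c :: rest)) then true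
    else pvScan kws rest

def determine_event_duration_alt (description : String) (priority : String) : Int :=
  if priority != "high" then 1
  else
    let d := PySem.Str.lower description
    if pvScan altLongMeetingKeywords d.toList then 2 else 1

-- ===== PRECONDITION & SPEC =====
def Spec_determine_event_duration (description : String) (priority : String) (out : Int) : Prop := out = determine_event_duration_alt description priority
instance (description : String) (priority : String) (out : Int) : Decidable (Spec_determine_event_duration description priority out) := by unfold Spec_determine_event_duration; infer_instance

-- ===== CLAIM (what is proved, stated in full; the proofs are below) =====
def Claim_equal_determine_event_duration : Prop := ∀ (description : String) (priority : String), Dom_determine_event_duration description priority → Spec_determine_event_duration description priority (determine_event_duration description priority)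

-- ===== LEMMAS AND PROOFS =====

-- the position scan finds exactly the keywords occurring as an infix (for nonempty keywords)
theorem pvScan_eq_any_infix (kws : List String) (h : ∀ k ∈ kws, k.toList ≠ []) :
    ∀ l : List Char, pvScan kws l = kws.any (fun k => decide (k.toList <:+: l)) := by
  intro l
  induction l with
  | nil =>
    symm
    simp only [pvScan, List.any_eq_false, decide_eq_true_eq, List.infix_nil]
    exact h
  | cons c rest ih =>
    simp only [pvScan]
    by_cases hc : kws.any (fun k => k.toList.isPrefixOf (c :: rest)) = true
    · rw [if_pos hc]
      rcases List.any_eq_true.mp hc with ⟨k, hk, hpre⟩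
      symm
      refine List.any_eq_true.mpr ⟨k, hk, ?_⟩
      simp only [decide_eq_true_eq]
      exact (List.isPrefixOf_iff_prefix.mp hpre).isInfix
    · rw [if_neg hc, ih]
      apply Bool.eq_iff_iff.mpr
      simp only [List.any_eq_true, decide_eq_true_eq]
      constructor
      · rintro ⟨k, hk, hinf⟩
        exact ⟨k, hk, List.infix_cons hinf⟩
      · rintro ⟨k, hk, hinf⟩
        rcases List.infix_cons_iff.mp hinf with hp | hinf'
        · exact absurd (List.any_eq_true.mpr ⟨k, hk, List.isPrefixOf_iff_prefix.mpr hp⟩) hc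
        · exact ⟨k, hk, hinf'⟩

-- isIn agrees with the infix test, keyword by keyword
theorem isIn_eq_decide_infix (kw s : String) :
    PySem.Str.isIn kw s = decide (kw.toList <:+: s.toList) := by
  apply Bool.eq_iff_iff.mpr
  simp only [decide_eq_true_eq]
  exact PySem.Str.isIn_iff_infix kw s

-- ===== VERDICT (by name: the statement is the Claim_ definition above) =====
theorem determine_event_duration_spec : Claim_equal_determine_event_duration := by
  intro description priority _
  unfold Spec_determine_event_duration determine_event_duration determine_event_duration_alt
  have hscan : pvScan altLongMeetingKeywords (PySem.Str.lower description).toList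
      = longMeetingKeywords.any
          (fun keyword => PySem.Str.isIn keyword (PySem.Str.lower description)) := by
    rw [pvScan_eq_any_infix altLongMeetingKeywords (by decide)]
    have : altLongMeetingKeywords = longMeetingKeywords := by decide
    rw [this]
    congr 1
    funext k
    exact (isIn_eq_decide_infix k (PySem.Str.lower description)).symm
  dsimp only
  by_cases hp : priority == "high"
  · simp only [bne, hp, Bool.not_true, hscan]
    split_ifs <;> simp_all
  · simp only [bne, hp, Bool.not_false]
    split_ifs <;> simp_all
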